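-- pv_equiv track=rewrite | github.com/reggyshicky/Leetcode_Questions | MoreLeetCode/MinMultiplication.py | solution
-- ===== SOURCE A (Python) =====
-- def solution(A):
--     multiplications = 0
--     for i in range(len(A)):
--         index = i
--         value = A[i]
--
--         if index % 4 == 0 and value <=0: #0, 4, 8...value should be positive
--             multiplications += 1
--         elif index % 2 == 1 and value != 0: #1,5,9.. value should be zero
--             multiplications += 1
--         elif index % 4 == 2 and value >= 0: #2,6,10 value should be negative
--             if value == 0:
--                 return -1 #value cannot be converted to zero
--             multiplications +=1
--     return multiplications
-- ===== SOURCE B (Python) =====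
-- def solution(A):
--     if any(i % 4 == 2 and v == 0 for i, v in enumerate(A)):
--         return -1
--     return sum(1 for i, v in enumerate(A)
--                if (i % 4 == 0 and v <= 0)
--                or (i % 2 == 1 and v != 0)
--                or (i % 4 == 2 and v >= 0))
-- ===== Notes on version B (the rewrite author's own statement) =====
-- stated objective: alternative
-- what changed: Replaces the single early-returning accumulator loop by two independent passes: an order-independent existence check for the -1 sentinel, then a pure count over the branch conditions.
import Mathlib
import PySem

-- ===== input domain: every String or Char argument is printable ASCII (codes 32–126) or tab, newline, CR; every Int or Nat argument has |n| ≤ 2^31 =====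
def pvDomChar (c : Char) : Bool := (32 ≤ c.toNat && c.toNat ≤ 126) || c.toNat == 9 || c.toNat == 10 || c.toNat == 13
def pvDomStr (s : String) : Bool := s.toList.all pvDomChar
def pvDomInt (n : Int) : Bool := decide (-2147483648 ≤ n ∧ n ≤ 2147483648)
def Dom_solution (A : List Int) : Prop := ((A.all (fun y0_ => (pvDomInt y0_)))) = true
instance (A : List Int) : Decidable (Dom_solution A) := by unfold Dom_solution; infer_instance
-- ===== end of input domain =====

-- B replaces A's single early-returning accumulator loop by two independent passes
-- (order-independent sentinel existence check, then a pure count); objective: alternative.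


-- ===== PORT A =====
-- the for-loop with early return, as structural recursion over the enumerated list
def solutionLoop : List (Int × Int) → Int → Int
  | [], m => m
  | (i, v) :: rest, m =>
    if i % 4 = 0 ∧ v ≤ 0 then solutionLoop rest (m + 1)
    else if i % 2 = 1 ∧ v ≠ 0 then solutionLoop rest (m + 1)
    else if i % 4 = 2 ∧ v ≥ 0 then
      (if v = 0 then -1 else solutionLoop rest (m + 1))
    else solutionLoop rest m

def solution (A : List Int) : Int := solutionLoop (PySem.List.enumerate A) 0

-- ===== PORT B =====
def solution_alt (A : List Int) : Int :=
  if (PySem.List.enumerate A).any (fun p => decide (p.1 % 4 = 2 ∧ p.2 = 0)) then -1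
  else ((PySem.List.enumerate A).countP
    (fun p => decide ((p.1 % 4 = 0 ∧ p.2 ≤ 0) ∨ (p.1 % 2 = 1 ∧ p.2 ≠ 0) ∨ (p.1 % 4 = 2 ∧ p.2 ≥ 0))) : Int)

-- ===== PRECONDITION & SPEC =====
def Spec_solution (A : List Int) (out : Int) : Prop := out = solution_alt A
instance (A : List Int) (out : Int) : Decidable (Spec_solution A out) := by unfold Spec_solution; infer_instance

-- ===== CLAIM (what is proved, stated in full; the proofs are below) =====
def Claim_equal_solution : Prop := ∀ (A : List Int), Dom_solution A → Spec_solution A (solution A)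

-- ===== LEMMAS AND PROOFS =====
theorem solutionLoop_eq (l : List (Int × Int)) (m : Int) :
    solutionLoop l m =
      if l.any (fun p => decide (p.1 % 4 = 2 ∧ p.2 = 0)) then -1
      else m + (l.countP
        (fun p => decide ((p.1 % 4 = 0 ∧ p.2 ≤ 0) ∨ (p.1 % 2 = 1 ∧ p.2 ≠ 0) ∨ (p.1 % 4 = 2 ∧ p.2 ≥ 0))) : Int) := by
  induction l generalizing m with
  | nil => simp [solutionLoop]
  | cons p rest ih =>
    obtain ⟨i, v⟩ := p
    have h4 : i % 4 = 0 ∨ i % 4 = 1 ∨ i % 4 = 2 ∨ i % 4 = 3 := by omega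
    have h2 : i % 4 = 2 → i % 2 = 0 := by omega
    cases hb : (rest.any fun p => decide (p.1 % 4 = 2 ∧ p.2 = 0)) with
    | true =>
      simp only [solutionLoop, List.any_cons, List.countP_cons, ih, hb, Bool.or_true,
        if_true, decide_eq_true_eq]
      split_ifs <;> push_cast <;> omega
    | false =>
      simp only [solutionLoop, List.any_cons, List.countP_cons, ih, hb, Bool.or_false,
        Bool.false_eq_true, if_false, decide_eq_true_eq]
      split_ifs <;> push_cast <;> omega

-- ===== VERDICT (by name: the statement is the Claim_ definition above) =====
theorem solution_spec : Claim_equal_solution := by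
  intro A _
  unfold Spec_solution solution solution_alt
  rw [solutionLoop_eq]
  split_ifs <;> simp
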